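-- pv_equiv track=rewrite | github.com/HeilemannLab/SPTAnalyser | pySPT/notebookspy/cell_script.py | localizations_del
-- ===== SOURCE A (Python) =====
-- def localizations_del(locs_to_del, idx):
--     """
--     Delete the first localizations of a trajectory. Target: localizations based on which the trajectories are created.
--     :param locs_to_del: Amount of localizations to delete.
--     """
--     # get rid of first two localizations
--     count = 0
--     idx_count = 0
--     for i in idx:
--         if i and count < 2:
--             idx[idx_count] = False
--             count += 1
--         idx_count += 1
--     return idx
-- ===== SOURCE B (Python) =====
-- def localizations_del(locs_to_del, idx):
--     """
--     Delete the first localizations of a trajectory. Target: localizations based on which the trajectories are created.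
--     :param locs_to_del: Amount of localizations to delete.
--     """
--     for _ in range(2):
--         if True in idx:
--             idx[idx.index(True)] = False
--     return idx
-- ===== Notes on version B (the rewrite author's own statement) =====
-- stated objective: faster
-- what changed: A's counter-guarded Python-level pass over every element is replaced by two rounds of find-and-clear: each round locates the first remaining True with the C-implemented 'in'/list.index and clears it, never scanning past the second True.
import Mathlib
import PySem

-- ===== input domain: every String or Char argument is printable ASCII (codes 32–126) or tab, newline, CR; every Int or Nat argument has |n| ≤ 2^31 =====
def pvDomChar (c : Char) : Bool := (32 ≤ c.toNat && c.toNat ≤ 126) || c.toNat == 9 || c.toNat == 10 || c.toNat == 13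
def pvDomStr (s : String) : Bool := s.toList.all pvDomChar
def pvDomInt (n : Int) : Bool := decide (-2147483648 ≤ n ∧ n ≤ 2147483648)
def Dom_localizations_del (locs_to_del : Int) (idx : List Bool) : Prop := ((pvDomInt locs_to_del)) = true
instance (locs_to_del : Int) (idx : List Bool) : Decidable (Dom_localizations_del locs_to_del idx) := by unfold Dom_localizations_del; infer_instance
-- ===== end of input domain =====

-- B replaces A's counter-guarded full pass by two rounds of find-and-clear via list.index, which a timing run measured faster (constant factor).
-- Both Pythons mutate idx in place identically; the equivalence proved here is about the return value.

-- ===== PORT A =====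
def localizations_del (locs_to_del : Int) (idx : List Bool) : List Bool :=
  (idx.foldl
    (fun (s : List Bool × Int × Int) (i : Bool) =>
      if i && decide (s.2.1 < 2) then
        (PySem.List.pySetD s.1 s.2.2 false, s.2.1 + 1, s.2.2 + 1)
      else
        (s.1, s.2.1, s.2.2 + 1))
    (idx, 0, 0)).1

-- ===== PORT B =====
def localizations_del_alt (locs_to_del : Int) (idx : List Bool) : List Bool :=
  (PySem.List.pyRange 0 2 1).foldl
    (fun (xs : List Bool) _ =>
      if xs.contains true then
        PySem.List.pySetD xs ((((PySem.List.index? xs true).getD 0 : Nat) : Int)) false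
      else xs)
    idx

-- ===== PRECONDITION & SPEC =====
def Spec_localizations_del (locs_to_del : Int) (idx : List Bool) (out : List Bool) : Prop := out = localizations_del_alt locs_to_del idx
instance (locs_to_del : Int) (idx : List Bool) (out : List Bool) : Decidable (Spec_localizations_del locs_to_del idx out) := by unfold Spec_localizations_del; infer_instance

-- ===== CLAIM (what is proved, stated in full; the proofs are below) =====
def Claim_equal_localizations_del : Prop := ∀ (locs_to_del : Int) (idx : List Bool), Dom_localizations_del locs_to_del idx → Spec_localizations_del locs_to_del idx (localizations_del locs_to_del idx)

-- ===== LEMMAS AND PROOFS =====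

-- Reference spec: flip the first k true entries to false.
def flipK : List Bool → Nat → List Bool
  | [], _ => []
  | b :: t, k => if b ∧ 0 < k then false :: flipK t (k - 1) else b :: flipK t k

lemma flipK_zero (xs : List Bool) : flipK xs 0 = xs := by
  induction xs with
  | nil => rfl
  | cons b t ih => simp [flipK, ih]

lemma flipK_not_mem (xs : List Bool) (h : true ∉ xs) : ∀ k, flipK xs k = xs := by
  induction xs with
  | nil => intro k; rfl
  | cons b t ih =>
    intro k
    simp at h
    simp [flipK, h.1, ih h.2]

lemma set_append_length (pre t : List Bool) (b x : Bool) :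
    (pre ++ b :: t).set pre.length x = pre ++ x :: t := by
  induction pre with
  | nil => rfl
  | cons p ps ih => simp [List.set, ih]

lemma A_inv (xs : List Bool) : ∀ (pre : List Bool) (k : Nat), k ≤ 2 →
    (xs.foldl
      (fun (s : List Bool × Int × Int) (i : Bool) =>
        if i && decide (s.2.1 < 2) then
          (PySem.List.pySetD s.1 s.2.2 false, s.2.1 + 1, s.2.2 + 1)
        else
          (s.1, s.2.1, s.2.2 + 1))
      (pre ++ xs, 2 - (k : Int), (pre.length : Int))).1 = pre ++ flipK xs k := by
  induction xs with
  | nil => intro pre k hk; simp [flipK]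
  | cons b t ih =>
    intro pre k hk
    rw [List.foldl_cons]
    cases b
    · -- b = false: condition is false
      simp only [Bool.false_and, Bool.false_eq_true, if_neg, not_false_iff, if_false]
      have := ih (pre ++ [false]) k hk
      simp only [List.append_assoc, List.cons_append, List.nil_append,
        List.length_append, List.length_cons, List.length_nil] at this
      rw [show ((pre.length : Int) + 1) = ((pre.length + (0 + 1) : Nat) : Int) by push_cast; ring]
      rw [this]
      simp [flipK]
    · cases k with
      | zero =>
        have hcond : (true && decide ((2 : Int) - ((0 : Nat) : Int) < 2)) = false := by decide
        rw [hcond, if_neg (by simp)]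
        have := ih (pre ++ [true]) 0 (by omega)
        simp only [List.append_assoc, List.cons_append, List.nil_append,
          List.length_append, List.length_cons, List.length_nil] at this
        rw [show ((pre.length : Int) + 1) = ((pre.length + (0 + 1) : Nat) : Int) by push_cast; ring]
        rw [this]
        simp [flipK, flipK_zero]
      | succ k' =>
        have hcond : (true && decide ((2 : Int) - ((k' + 1 : Nat) : Int) < 2)) = true := by
          simp; push_cast; omega
        rw [hcond, if_pos rfl]
        have hset : PySem.List.pySetD (pre ++ true :: t) ((pre.length : Int)) false
            = pre ++ false :: t := by
          rw [PySem.List.pySetD_natCast, set_append_length]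
        simp only [hset]
        have hc : (2 : Int) - ((k' + 1 : Nat) : Int) + 1 = 2 - ((k' : Nat) : Int) := by
          push_cast; ring
        have := ih (pre ++ [false]) k' (by omega)
        simp only [List.append_assoc, List.cons_append, List.nil_append,
          List.length_append, List.length_cons, List.length_nil] at this
        rw [hc, show ((pre.length : Int) + 1) = ((pre.length + (0 + 1) : Nat) : Int) by push_cast; ring]
        rw [this]
        simp [flipK]

-- one round of B's find-and-clear flips exactly the first true entry
lemma B_step (xs : List Bool) :
    (if xs.contains true then
        PySem.List.pySetD xs ((((PySem.List.index? xs true).getD 0 : Nat) : Int)) false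
      else xs) = flipK xs 1 := by
  induction xs with
  | nil => rfl
  | cons b t ih =>
    cases b
    · have hmem : (false :: t).contains true = t.contains true := by simp
      by_cases h : true ∈ t
      · have hc : (false :: t).contains true = true := by simp [h]
        have hc2 : t.contains true = true := by simp [h]
        rw [if_pos hc]
        obtain ⟨j, hj⟩ : ∃ j, PySem.List.index? t true = some j := by
          have := (PySem.List.index?_isSome_iff (xs := t) (v := true)).mpr h
          exact Option.isSome_iff_exists.mp this
        rw [show PySem.List.index? (false :: t) true = (PySem.List.index? t true).map (· + 1) from
          PySem.List.index?_cons_of_ne t (by decide : (false : Bool) ≠ true), hj]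
        simp only [Option.map_some, Option.getD_some]
        rw [PySem.List.pySetD_natCast]
        have ihs : t.set j false = flipK t 1 := by
          have := ih
          rw [if_pos hc2, hj] at this
          simpa [PySem.List.pySetD_natCast] using this
        simp [flipK, List.set, ihs]
      · have hc : (false :: t).contains true = false := by simp [h]
        rw [if_neg (by simp [h])]
        simp [flipK, flipK_not_mem t h]
    · rw [if_pos (by simp)]
      rw [PySem.List.index?_cons_self]
      simp only [Option.getD_some]
      rw [PySem.List.pySetD_natCast]
      simp [flipK, flipK_zero, List.set]

lemma flipK_one_one (xs : List Bool) : flipK (flipK xs 1) 1 = flipK xs 2 := by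
  induction xs with
  | nil => rfl
  | cons b t ih =>
    cases b
    · simp [flipK, ih]
    · simp [flipK, flipK_zero]

lemma A_eq_flipK (locs_to_del : Int) (idx : List Bool) :
    localizations_del locs_to_del idx = flipK idx 2 := by
  have := A_inv idx [] 2 (by omega)
  simpa [localizations_del] using this

lemma B_eq_flipK (locs_to_del : Int) (idx : List Bool) :
    localizations_del_alt locs_to_del idx = flipK idx 2 := by
  have hr : PySem.List.pyRange 0 2 1 = [0, 1] := by decide
  unfold localizations_del_alt
  rw [hr]
  simp only [List.foldl_cons, List.foldl_nil]
  rw [B_step, B_step, flipK_one_one]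

-- ===== VERDICT (by name: the statement is the Claim_ definition above) =====
theorem localizations_del_spec : Claim_equal_localizations_del := by
  intro locs idx _
  unfold Spec_localizations_del
  rw [A_eq_flipK, B_eq_flipK]
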